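-- pv_equiv track=rewrite | github.com/for-the-juan/FlexSpGEMM | data/probe_sh/run_all_probes.py | parse_csv_section
-- ===== SOURCE A (Python) =====
-- def parse_csv_section(text, marker):
--     """Extract CSV header + rows from the section starting with *marker*."""
--     if marker not in text:
--         return [], []
--
--     tail = text.split(marker, 1)[1]
--     csv_lines = []
--     for raw in tail.splitlines():
--         line = raw.strip()
--         if not line:
--             continue
--         if line.startswith("===") or line.startswith("===="):
--             break
--         if line.startswith("="):
--             break
--         if "," in line:
--             csv_lines.append(line)
--
--     if not csv_lines:
--         return [], []
--
--     header = [x.strip() for x in csv_lines[0].split(",")]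
--     rows = []
--     for line in csv_lines[1:]:
--         parts = [x.strip() for x in line.split(",")]
--         if len(parts) != len(header):
--             continue
--         rows.append(dict(zip(header, parts)))
--     return header, rows
-- ===== SOURCE B (Python) =====
-- def parse_csv_section(text, marker):
--     """Extract CSV header + rows from the section starting with *marker*."""
--     if marker not in text:
--         return [], []
--     header = None
--     rows = []
--     for raw in text.split(marker, 1)[1].splitlines():
--         line = raw.strip()
--         if not line:
--             continue
--         if line.startswith("="):
--             break
--         if "," not in line:
--             continue
--         parts = [x.strip() for x in line.split(",")]
--         if header is None:
--             header = parts
--         elif len(parts) == len(header):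
--             rows.append(dict(zip(header, parts)))
--     if header is None:
--         return [], []
--     return header, rows
-- ===== Notes on version B (the rewrite author's own statement) =====
-- stated objective: simpler
-- what changed: Single pass over the lines with an optional header variable replaces A's two-phase design (collect csv_lines into an intermediate list, then re-scan it to build header and rows); the triple startswith('===')/('====')/('=') break chain collapses to one startswith('=').
import Mathlib
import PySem

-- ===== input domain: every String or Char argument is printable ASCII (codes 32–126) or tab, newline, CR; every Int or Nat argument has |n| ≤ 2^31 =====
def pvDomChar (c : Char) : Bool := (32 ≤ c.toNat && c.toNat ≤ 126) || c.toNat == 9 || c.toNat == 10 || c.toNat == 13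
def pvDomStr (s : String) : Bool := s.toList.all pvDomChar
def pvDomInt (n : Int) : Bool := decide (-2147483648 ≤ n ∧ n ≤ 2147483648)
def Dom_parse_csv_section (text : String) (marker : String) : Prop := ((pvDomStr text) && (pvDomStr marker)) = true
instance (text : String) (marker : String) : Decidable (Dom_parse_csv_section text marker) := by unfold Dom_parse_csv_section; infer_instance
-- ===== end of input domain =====

-- B merges A's two phases (collect csv_lines, then re-scan them) into one pass with an
-- optional header, and collapses the ===/====/= break chain into one startswith("=").

-- ===== PORT A =====
-- first loop of A: collect stripped, non-blank, comma-containing lines, stopping at '='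
def pvCollectA : List String → List String
  | [] => []
  | raw :: rest =>
    let line := PySem.Str.strip raw
    if PySem.Str.len line = 0 then pvCollectA rest
    else if PySem.Str.startswith line "===" then []
    else if PySem.Str.startswith line "====" then []
    else if PySem.Str.startswith line "=" then []
    else if PySem.Str.isIn "," line then line :: pvCollectA rest
    else pvCollectA rest

def parse_csv_section (text : String) (marker : String) : List String × (List (List (String × String))) :=
  if ¬ PySem.Str.isIn marker text then ([], [])
  else
    let tail := PySem.List.pyGetD ((PySem.Str.splitMax? text marker 1).getD []) 1 ""
    match pvCollectA (PySem.Str.splitlines tail) with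
    | [] => ([], [])
    | first :: rest =>
      let header := ((PySem.Str.split? first ",").getD []).map PySem.Str.strip
      let rows := rest.foldl (fun rows line =>
        let parts := ((PySem.Str.split? line ",").getD []).map PySem.Str.strip
        if parts.length ≠ header.length then rows
        else rows ++ [(PySem.Dict.ofList (header.zip parts)).items]) []
      (header, rows)

-- ===== PORT B =====
-- B's single loop: optional header + rows accumulator, early stop on '='
def pvGoB (header? : Option (List String)) (rows : List (List (String × String))) :
    List String → List String × (List (List (String × String)))
  | [] =>
    match header? with
    | none => ([], [])
    | some h => (h, rows)
  | raw :: rest =>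
    let line := PySem.Str.strip raw
    if PySem.Str.len line = 0 then pvGoB header? rows rest
    else if PySem.Str.startswith line "=" then
      match header? with
      | none => ([], [])
      | some h => (h, rows)
    else if ¬ PySem.Str.isIn "," line then pvGoB header? rows rest
    else
      let parts := ((PySem.Str.split? line ",").getD []).map PySem.Str.strip
      match header? with
      | none => pvGoB (some parts) rows rest
      | some h =>
        if parts.length = h.length then
          pvGoB header? (rows ++ [(PySem.Dict.ofList (h.zip parts)).items]) rest
        else pvGoB header? rows rest

def parse_csv_section_alt (text : String) (marker : String) : List String × (List (List (String × String))) :=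
  if ¬ PySem.Str.isIn marker text then ([], [])
  else pvGoB none []
    (PySem.Str.splitlines (PySem.List.pyGetD ((PySem.Str.splitMax? text marker 1).getD []) 1 ""))

-- ===== PRECONDITION & SPEC =====
-- Pre_ excludes only marker = "", on which Python A raises ValueError (text.split("", 1)).
def Pre_parse_csv_section (text : String) (marker : String) : Prop := marker ≠ ""
instance (text : String) (marker : String) : Decidable (Pre_parse_csv_section text marker) := by
  unfold Pre_parse_csv_section; infer_instance

def pvWitness_parse_csv_section : String × String := ("head M\na, b\n 1 ,2\nnocomma\n= end\nx,y", "M")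

def Spec_parse_csv_section (text : String) (marker : String) (out : List String × (List (List (String × String)))) : Prop := out = parse_csv_section_alt text marker
instance (text : String) (marker : String) (out : List String × (List (List (String × String)))) : Decidable (Spec_parse_csv_section text marker out) := by unfold Spec_parse_csv_section; infer_instance

-- ===== CLAIM (what is proved, stated in full; the proofs are below) =====
def Claim_equal_parse_csv_section : Prop := ∀ (text : String) (marker : String), Dom_parse_csv_section text marker → Pre_parse_csv_section text marker → Spec_parse_csv_section text marker (parse_csv_section text marker)

-- ===== LEMMAS AND PROOFS =====

-- proof-side vocabulary
def pvParts (line : String) : List String := ((PySem.Str.split? line ",").getD []).map PySem.Str.strip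

def pvRowsFrom (h : List String) (ls : List String) : List (List (String × String)) :=
  (ls.filter (fun line => (pvParts line).length = h.length)).map
    (fun line => (PySem.Dict.ofList (h.zip (pvParts line))).items)

def pvPhase2 : List String → List String × (List (List (String × String)))
  | [] => ([], [])
  | first :: rest => (pvParts first, pvRowsFrom (pvParts first) rest)

lemma pvNeTrue {b : Bool} (h : b = false) : ¬ (b = true) := by
  rw [h]; exact Bool.false_ne_true

lemma pv_sw_of_sw3 (l : String) (h : PySem.Str.startswith l "===" = true) :
    PySem.Str.startswith l "=" = true := by
  simp only [PySem.Str.startswith_eq] at *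
  rw [PySem.Chars.startswith_iff] at *
  exact List.IsPrefix.trans (by decide) h

lemma pv_sw_of_sw4 (l : String) (h : PySem.Str.startswith l "====" = true) :
    PySem.Str.startswith l "=" = true := by
  simp only [PySem.Str.startswith_eq] at *
  rw [PySem.Chars.startswith_iff] at *
  exact List.IsPrefix.trans (by decide) h

lemma pvRowsFrom_cons (h : List String) (line : String) (ls : List String) :
    pvRowsFrom h (line :: ls) =
      (if (pvParts line).length = h.length
        then [(PySem.Dict.ofList (h.zip (pvParts line))).items] else []) ++ pvRowsFrom h ls := by
  by_cases hl : (pvParts line).length = h.length <;> simp [pvRowsFrom, hl]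

-- cons-step characterisations of A's first loop
lemma pvCollectA_cons_blank (raw : String) (rest : List String)
    (hb : PySem.Str.len (PySem.Str.strip raw) = 0) :
    pvCollectA (raw :: rest) = pvCollectA rest := by
  simp only [pvCollectA]; rw [if_pos hb]

lemma pvCollectA_cons_break (raw : String) (rest : List String)
    (hb : ¬ PySem.Str.len (PySem.Str.strip raw) = 0)
    (he : PySem.Str.startswith (PySem.Str.strip raw) "=" = true) :
    pvCollectA (raw :: rest) = [] := by
  simp only [pvCollectA, hb, if_false]
  split_ifs <;> rfl

lemma pvCollectA_cons_comma (raw : String) (rest : List String)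
    (hb : ¬ PySem.Str.len (PySem.Str.strip raw) = 0)
    (he : PySem.Str.startswith (PySem.Str.strip raw) "=" = false)
    (hcm : PySem.Str.isIn "," (PySem.Str.strip raw) = true) :
    pvCollectA (raw :: rest) = PySem.Str.strip raw :: pvCollectA rest := by
  have h3 : PySem.Str.startswith (PySem.Str.strip raw) "===" = false := by
    by_contra hc
    rw [Bool.not_eq_false] at hc
    rw [pv_sw_of_sw3 _ hc] at he; exact Bool.true_eq_false.mp he
  have h4 : PySem.Str.startswith (PySem.Str.strip raw) "====" = false := by
    by_contra hc
    rw [Bool.not_eq_false] at hc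
    rw [pv_sw_of_sw4 _ hc] at he; exact Bool.true_eq_false.mp he
  simp only [pvCollectA]
  rw [if_neg hb, if_neg (pvNeTrue h3), if_neg (pvNeTrue h4), if_neg (pvNeTrue he), if_pos hcm]

lemma pvCollectA_cons_nocomma (raw : String) (rest : List String)
    (hb : ¬ PySem.Str.len (PySem.Str.strip raw) = 0)
    (he : PySem.Str.startswith (PySem.Str.strip raw) "=" = false)
    (hcm : PySem.Str.isIn "," (PySem.Str.strip raw) = false) :
    pvCollectA (raw :: rest) = pvCollectA rest := by
  have h3 : PySem.Str.startswith (PySem.Str.strip raw) "===" = false := by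
    by_contra hc
    rw [Bool.not_eq_false] at hc
    rw [pv_sw_of_sw3 _ hc] at he; exact Bool.true_eq_false.mp he
  have h4 : PySem.Str.startswith (PySem.Str.strip raw) "====" = false := by
    by_contra hc
    rw [Bool.not_eq_false] at hc
    rw [pv_sw_of_sw4 _ hc] at he; exact Bool.true_eq_false.mp he
  simp only [pvCollectA]
  rw [if_neg hb, if_neg (pvNeTrue h3), if_neg (pvNeTrue h4), if_neg (pvNeTrue he),
      if_neg (pvNeTrue hcm)]

-- cons-step characterisations of B's loop
lemma pvGoB_cons_blank (o : Option (List String)) (rows : List (List (String × String)))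
    (raw : String) (rest : List String)
    (hb : PySem.Str.len (PySem.Str.strip raw) = 0) :
    pvGoB o rows (raw :: rest) = pvGoB o rows rest := by
  simp only [pvGoB]; rw [if_pos hb]

lemma pvGoB_cons_skip (o : Option (List String)) (rows : List (List (String × String)))
    (raw : String) (rest : List String)
    (hb : ¬ PySem.Str.len (PySem.Str.strip raw) = 0)
    (he : PySem.Str.startswith (PySem.Str.strip raw) "=" = false)
    (hcm : PySem.Str.isIn "," (PySem.Str.strip raw) = false) :
    pvGoB o rows (raw :: rest) = pvGoB o rows rest := by
  simp only [pvGoB]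
  rw [if_neg hb, if_neg (pvNeTrue he), if_pos (pvNeTrue hcm)]

lemma pvGoB_cons_comma_none (rows : List (List (String × String)))
    (raw : String) (rest : List String)
    (hb : ¬ PySem.Str.len (PySem.Str.strip raw) = 0)
    (he : PySem.Str.startswith (PySem.Str.strip raw) "=" = false)
    (hcm : PySem.Str.isIn "," (PySem.Str.strip raw) = true) :
    pvGoB none rows (raw :: rest)
      = pvGoB (some (((PySem.Str.split? (PySem.Str.strip raw) ",").getD []).map
          PySem.Str.strip)) rows rest := by
  simp only [pvGoB]
  rw [if_neg hb, if_neg (pvNeTrue he), if_neg (not_not_intro hcm)]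

lemma pvGoB_cons_comma_some (h : List String) (rows : List (List (String × String)))
    (raw : String) (rest : List String)
    (hb : ¬ PySem.Str.len (PySem.Str.strip raw) = 0)
    (he : PySem.Str.startswith (PySem.Str.strip raw) "=" = false)
    (hcm : PySem.Str.isIn "," (PySem.Str.strip raw) = true) :
    pvGoB (some h) rows (raw :: rest)
      = (if (((PySem.Str.split? (PySem.Str.strip raw) ",").getD []).map
            PySem.Str.strip).length = h.length
         then pvGoB (some h) (rows ++ [(PySem.Dict.ofList
            (h.zip (((PySem.Str.split? (PySem.Str.strip raw) ",").getD []).map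
              PySem.Str.strip))).items]) rest
         else pvGoB (some h) rows rest) := by
  simp only [pvGoB]
  rw [if_neg hb, if_neg (pvNeTrue he), if_neg (not_not_intro hcm)]

lemma pvGoB_cons_break (o : Option (List String)) (rows : List (List (String × String)))
    (raw : String) (rest : List String)
    (hb : ¬ PySem.Str.len (PySem.Str.strip raw) = 0)
    (he : PySem.Str.startswith (PySem.Str.strip raw) "=" = true) :
    pvGoB o rows (raw :: rest) = (match o with | none => ([], []) | some h => (h, rows)) := by
  simp only [pvGoB]
  rw [if_neg hb, if_pos he]

lemma pvGoB_some (h : List String) (ls : List String) : ∀ rows,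
    pvGoB (some h) rows ls = (h, rows ++ pvRowsFrom h (pvCollectA ls)) := by
  induction ls with
  | nil => intro rows; simp [pvGoB, pvCollectA, pvRowsFrom]
  | cons raw rest ih =>
    intro rows
    by_cases hb : PySem.Str.len (PySem.Str.strip raw) = 0
    · rw [pvGoB_cons_blank _ _ _ _ hb, pvCollectA_cons_blank _ _ hb, ih]
    · cases he : PySem.Str.startswith (PySem.Str.strip raw) "=" with
      | true =>
        rw [pvGoB_cons_break _ _ _ _ hb he, pvCollectA_cons_break _ _ hb he]
        simp [pvRowsFrom]
      | false =>
        cases hcm : PySem.Str.isIn "," (PySem.Str.strip raw) with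
        | true =>
          rw [pvGoB_cons_comma_some _ _ _ _ hb he hcm, pvCollectA_cons_comma _ _ hb he hcm,
              pvRowsFrom_cons]
          by_cases hlen : (((PySem.Str.split? (PySem.Str.strip raw) ",").getD []).map
              PySem.Str.strip).length = h.length
          · rw [if_pos hlen, if_pos (by simpa [pvParts] using hlen), ih]
            simp [pvParts, List.append_assoc]
          · rw [if_neg hlen, if_neg (by simpa [pvParts] using hlen), ih]
            simp
        | false =>
          rw [pvGoB_cons_skip _ _ _ _ hb he hcm, pvCollectA_cons_nocomma _ _ hb he hcm, ih]

lemma pvGoB_none (ls : List String) : pvGoB none [] ls = pvPhase2 (pvCollectA ls) := by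
  induction ls with
  | nil => simp [pvGoB, pvCollectA, pvPhase2]
  | cons raw rest ih =>
    by_cases hb : PySem.Str.len (PySem.Str.strip raw) = 0
    · rw [pvGoB_cons_blank _ _ _ _ hb, pvCollectA_cons_blank _ _ hb, ih]
    · cases he : PySem.Str.startswith (PySem.Str.strip raw) "=" with
      | true =>
        rw [pvGoB_cons_break _ _ _ _ hb he, pvCollectA_cons_break _ _ hb he]
        rfl
      | false =>
        cases hcm : PySem.Str.isIn "," (PySem.Str.strip raw) with
        | true =>
          rw [pvGoB_cons_comma_none _ _ _ hb he hcm, pvCollectA_cons_comma _ _ hb he hcm,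
              pvGoB_some]
          simp [pvPhase2, pvParts]
        | false =>
          rw [pvGoB_cons_skip _ _ _ _ hb he hcm, pvCollectA_cons_nocomma _ _ hb he hcm, ih]

lemma pvFoldA (h : List String) (ls : List String) : ∀ rows,
    ls.foldl (fun rows line =>
      if (((PySem.Str.split? line ",").getD []).map PySem.Str.strip).length ≠ h.length then rows
      else rows ++ [(PySem.Dict.ofList
        (h.zip (((PySem.Str.split? line ",").getD []).map PySem.Str.strip))).items]) rows
      = rows ++ pvRowsFrom h ls := by
  induction ls with
  | nil => intro rows; simp [pvRowsFrom]
  | cons line rest ih =>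
    intro rows
    simp only [List.foldl_cons]
    by_cases hl : (((PySem.Str.split? line ",").getD []).map PySem.Str.strip).length = h.length
    · rw [if_neg (not_not_intro hl), ih, pvRowsFrom_cons, if_pos (by simpa [pvParts] using hl)]
      simp [pvParts, List.append_assoc]
    · rw [if_pos hl, ih, pvRowsFrom_cons, if_neg (by simpa [pvParts] using hl)]
      simp

-- ===== VERDICT (by name: the statement is the Claim_ definition above) =====
theorem parse_csv_section_spec : Claim_equal_parse_csv_section := by
  intro text marker _ _
  unfold Spec_parse_csv_section parse_csv_section parse_csv_section_alt
  by_cases hin : PySem.Str.isIn marker text = true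
  · rw [if_neg (not_not_intro hin), if_neg (not_not_intro hin), pvGoB_none]
    cases hc : pvCollectA (PySem.Str.splitlines
        (PySem.List.pyGetD ((PySem.Str.splitMax? text marker 1).getD []) 1 "")) with
    | nil => simp only [hc]; rfl
    | cons first rest =>
      simp only [hc]
      rw [pvFoldA (((PySem.Str.split? first ",").getD []).map PySem.Str.strip) rest]
      simp [pvPhase2, pvParts]
  · rw [if_pos hin, if_pos hin]
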